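-- pv_equiv track=rewrite | github.com/SepehrQasemi/Buff-mini | scripts/run_stage74.py | _group_changed_files
-- ===== SOURCE A (Python) =====
-- def _group_changed_files(paths: list[str]) -> dict[str, list[str]]:
--     groups: dict[str, list[str]] = {
--         "validation_and_decision_semantics": [],
--         "backtest_and_data_validity": [],
--         "reporting_and_ui": [],
--         "tests": [],
--         "docs_and_artifacts": [],
--         "workflow_and_misc": [],
--     }
--     for path in paths:
--         normalized = path.replace("/", "\\")
--         if (
--             normalized.startswith("src\\buffmini\\validation")
--             or normalized.startswith("src\\buffmini\\stage57")
--             or normalized.startswith("src\\buffmini\\stage58")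
--             or normalized.startswith("src\\buffmini\\stage61")
--             or normalized.startswith("scripts\\run_stage53")
--             or normalized.startswith("scripts\\run_stage57")
--             or normalized.startswith("scripts\\run_stage58")
--             or normalized.startswith("scripts\\run_stage60_72")
--             or normalized.startswith("scripts\\run_stage61")
--             or normalized.startswith("scripts\\run_stage67")
--         ):
--             groups["validation_and_decision_semantics"].append(path)
--         elif (
--             normalized.startswith("src\\buffmini\\backtest")
--             or normalized.startswith("src\\buffmini\\data")
--             or normalized.startswith("src\\buffmini\\stage48")
--             or normalized.startswith("src\\buffmini\\stage52")
--             or normalized.startswith("src\\buffmini\\stage70")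
--             or normalized.startswith("src\\buffmini\\stage71")
--         ):
--             groups["backtest_and_data_validity"].append(path)
--         elif (
--             normalized.startswith("src\\buffmini\\ui")
--             or normalized.startswith("src\\buffmini\\diagnostics")
--             or normalized.startswith("scripts\\run_stage74")
--         ):
--             groups["reporting_and_ui"].append(path)
--         elif normalized.startswith("tests\\"):
--             groups["tests"].append(path)
--         elif normalized.startswith("docs\\"):
--             groups["docs_and_artifacts"].append(path)
--         else:
--             groups["workflow_and_misc"].append(path)
--     return {key: value for key, value in groups.items() if value}
-- ===== SOURCE B (Python) =====
-- _RULES = [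
--     ("validation_and_decision_semantics", (
--         "src\\buffmini\\validation", "src\\buffmini\\stage57", "src\\buffmini\\stage58",
--         "src\\buffmini\\stage61", "scripts\\run_stage53", "scripts\\run_stage57",
--         "scripts\\run_stage58", "scripts\\run_stage60_72", "scripts\\run_stage61",
--         "scripts\\run_stage67")),
--     ("backtest_and_data_validity", (
--         "src\\buffmini\\backtest", "src\\buffmini\\data", "src\\buffmini\\stage48",
--         "src\\buffmini\\stage52", "src\\buffmini\\stage70", "src\\buffmini\\stage71")),
--     ("reporting_and_ui", (
--         "src\\buffmini\\ui", "src\\buffmini\\diagnostics", "scripts\\run_stage74")),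
--     ("tests", ("tests\\",)),
--     ("docs_and_artifacts", ("docs\\",)),
-- ]
--
--
-- def _classify(path):
--     normalized = path.replace("/", "\\")
--     for name, prefixes in _RULES:
--         if normalized.startswith(prefixes):
--             return name
--     return "workflow_and_misc"
--
--
-- def _group_changed_files(paths):
--     result = {}
--     for name in [name for name, _ in _RULES] + ["workflow_and_misc"]:
--         matched = [p for p in paths if _classify(p) == name]
--         if matched:
--             result[name] = matched
--     return result
-- ===== Notes on version B (the rewrite author's own statement) =====
-- stated objective: idiomatic
-- what changed: Replaces A's single pass with a six-branch if/elif chain appending into a pre-built dict by a declarative ordered rules table with a first-match classifier, building the result group-by-group with one filter pass per group (empty groups never created).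
import Mathlib
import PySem

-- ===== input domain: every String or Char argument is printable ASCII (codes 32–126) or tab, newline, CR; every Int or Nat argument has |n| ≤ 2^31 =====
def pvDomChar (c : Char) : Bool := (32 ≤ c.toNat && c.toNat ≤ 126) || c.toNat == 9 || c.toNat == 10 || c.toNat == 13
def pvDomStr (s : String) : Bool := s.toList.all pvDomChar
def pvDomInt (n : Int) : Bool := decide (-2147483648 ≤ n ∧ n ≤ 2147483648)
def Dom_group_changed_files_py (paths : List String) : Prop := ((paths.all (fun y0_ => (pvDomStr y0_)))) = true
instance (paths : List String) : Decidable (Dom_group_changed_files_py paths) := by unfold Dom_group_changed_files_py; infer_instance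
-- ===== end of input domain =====

-- B replaces A's one-pass if/elif accumulation into a pre-keyed dict by a rules table with a
-- first-match classifier and a per-group filter pass (idiomatic group-by; same cost class).

-- ===== PORT A =====
-- loop body of A's `for path in paths` (the if/elif chain; groups[k].append(path) = modify k (· ++ [path]))
def pvStepA (g : PySem.Dict String (List String)) (path : String) : PySem.Dict String (List String) :=
  let normalized := PySem.Str.replace path "/" "\\"
  if PySem.Str.startswith normalized "src\\buffmini\\validation"
      || PySem.Str.startswith normalized "src\\buffmini\\stage57"
      || PySem.Str.startswith normalized "src\\buffmini\\stage58"
      || PySem.Str.startswith normalized "src\\buffmini\\stage61"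
      || PySem.Str.startswith normalized "scripts\\run_stage53"
      || PySem.Str.startswith normalized "scripts\\run_stage57"
      || PySem.Str.startswith normalized "scripts\\run_stage58"
      || PySem.Str.startswith normalized "scripts\\run_stage60_72"
      || PySem.Str.startswith normalized "scripts\\run_stage61"
      || PySem.Str.startswith normalized "scripts\\run_stage67" then
    g.modify "validation_and_decision_semantics" [] (· ++ [path])
  else if PySem.Str.startswith normalized "src\\buffmini\\backtest"
      || PySem.Str.startswith normalized "src\\buffmini\\data"
      || PySem.Str.startswith normalized "src\\buffmini\\stage48"
      || PySem.Str.startswith normalized "src\\buffmini\\stage52"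
      || PySem.Str.startswith normalized "src\\buffmini\\stage70"
      || PySem.Str.startswith normalized "src\\buffmini\\stage71" then
    g.modify "backtest_and_data_validity" [] (· ++ [path])
  else if PySem.Str.startswith normalized "src\\buffmini\\ui"
      || PySem.Str.startswith normalized "src\\buffmini\\diagnostics"
      || PySem.Str.startswith normalized "scripts\\run_stage74" then
    g.modify "reporting_and_ui" [] (· ++ [path])
  else if PySem.Str.startswith normalized "tests\\" then
    g.modify "tests" [] (· ++ [path])
  else if PySem.Str.startswith normalized "docs\\" then
    g.modify "docs_and_artifacts" [] (· ++ [path])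
  else
    g.modify "workflow_and_misc" [] (· ++ [path])

def group_changed_files_py (paths : List String) : List (String × List String) :=
  let groups : PySem.Dict String (List String) := PySem.Dict.mk
    [("validation_and_decision_semantics", []), ("backtest_and_data_validity", []),
     ("reporting_and_ui", []), ("tests", []), ("docs_and_artifacts", []),
     ("workflow_and_misc", [])]
  let groups := paths.foldl pvStepA groups
  -- {key: value for key, value in groups.items() if value}
  groups.items.filter (fun kv => !kv.2.isEmpty)

-- ===== PORT B =====
def pvRules : List (String × List String) :=
  [("validation_and_decision_semantics",
    ["src\\buffmini\\validation", "src\\buffmini\\stage57", "src\\buffmini\\stage58",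
     "src\\buffmini\\stage61", "scripts\\run_stage53", "scripts\\run_stage57",
     "scripts\\run_stage58", "scripts\\run_stage60_72", "scripts\\run_stage61",
     "scripts\\run_stage67"]),
   ("backtest_and_data_validity",
    ["src\\buffmini\\backtest", "src\\buffmini\\data", "src\\buffmini\\stage48",
     "src\\buffmini\\stage52", "src\\buffmini\\stage70", "src\\buffmini\\stage71"]),
   ("reporting_and_ui",
    ["src\\buffmini\\ui", "src\\buffmini\\diagnostics", "scripts\\run_stage74"]),
   ("tests", ["tests\\"]),
   ("docs_and_artifacts", ["docs\\"])]

-- _classify: first rule whose prefix tuple matches; default group otherwise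
def pvClassify (path : String) : String :=
  let normalized := PySem.Str.replace path "/" "\\"
  match pvRules.find? (fun r => r.2.any (fun pre => PySem.Str.startswith normalized pre)) with
  | some r => r.1
  | none => "workflow_and_misc"

def group_changed_files_py_alt (paths : List String) : List (String × List String) :=
  (pvRules.map Prod.fst ++ ["workflow_and_misc"]).foldl
    (fun acc name =>
      let matched := paths.filter (fun p => pvClassify p == name)
      if matched.isEmpty then acc else acc ++ [(name, matched)]) []

-- ===== PRECONDITION & SPEC =====
def Spec_group_changed_files_py (paths : List String) (out : List (String × List String)) : Prop := out = group_changed_files_py_alt paths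
instance (paths : List String) (out : List (String × List String)) : Decidable (Spec_group_changed_files_py paths out) := by unfold Spec_group_changed_files_py; infer_instance

-- ===== CLAIM (what is proved, stated in full; the proofs are below) =====
def Claim_equal_group_changed_files_py : Prop := ∀ (paths : List String), Dom_group_changed_files_py paths → Spec_group_changed_files_py paths (group_changed_files_py paths)

-- ===== LEMMAS AND PROOFS =====

set_option maxHeartbeats 1000000

-- proof-only helpers: the branch conditions of A's if/elif chain (right-associated)
def pvC1 (n : String) : Bool :=
  PySem.Str.startswith n "src\\buffmini\\validation"
    || (PySem.Str.startswith n "src\\buffmini\\stage57"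
    || (PySem.Str.startswith n "src\\buffmini\\stage58"
    || (PySem.Str.startswith n "src\\buffmini\\stage61"
    || (PySem.Str.startswith n "scripts\\run_stage53"
    || (PySem.Str.startswith n "scripts\\run_stage57"
    || (PySem.Str.startswith n "scripts\\run_stage58"
    || (PySem.Str.startswith n "scripts\\run_stage60_72"
    || (PySem.Str.startswith n "scripts\\run_stage61"
    || PySem.Str.startswith n "scripts\\run_stage67"))))))))

def pvC2 (n : String) : Bool :=
  PySem.Str.startswith n "src\\buffmini\\backtest"
    || (PySem.Str.startswith n "src\\buffmini\\data"
    || (PySem.Str.startswith n "src\\buffmini\\stage48"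
    || (PySem.Str.startswith n "src\\buffmini\\stage52"
    || (PySem.Str.startswith n "src\\buffmini\\stage70"
    || PySem.Str.startswith n "src\\buffmini\\stage71"))))

def pvC3 (n : String) : Bool :=
  PySem.Str.startswith n "src\\buffmini\\ui"
    || (PySem.Str.startswith n "src\\buffmini\\diagnostics"
    || PySem.Str.startswith n "scripts\\run_stage74")

-- explicit first-match classifier both ports are reduced to
def pvCls (p : String) : String :=
  let n := PySem.Str.replace p "/" "\\"
  if pvC1 n then "validation_and_decision_semantics"
  else if pvC2 n then "backtest_and_data_validity"
  else if pvC3 n then "reporting_and_ui"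
  else if PySem.Str.startswith n "tests\\" then "tests"
  else if PySem.Str.startswith n "docs\\" then "docs_and_artifacts"
  else "workflow_and_misc"

def pvKeys0 : List String :=
  ["validation_and_decision_semantics", "backtest_and_data_validity",
   "reporting_and_ui", "tests", "docs_and_artifacts", "workflow_and_misc"]

def pvInit : PySem.Dict String (List String) := PySem.Dict.mk
  [("validation_and_decision_semantics", []), ("backtest_and_data_validity", []),
   ("reporting_and_ui", []), ("tests", []), ("docs_and_artifacts", []),
   ("workflow_and_misc", [])]

lemma pvC1_eq (n : String) :
    (["src\\buffmini\\validation", "src\\buffmini\\stage57", "src\\buffmini\\stage58",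
      "src\\buffmini\\stage61", "scripts\\run_stage53", "scripts\\run_stage57",
      "scripts\\run_stage58", "scripts\\run_stage60_72", "scripts\\run_stage61",
      "scripts\\run_stage67"].any (fun pre => PySem.Str.startswith n pre)) = pvC1 n := by
  simp [pvC1, List.any_cons, List.any_nil]

lemma pvC2_eq (n : String) :
    (["src\\buffmini\\backtest", "src\\buffmini\\data", "src\\buffmini\\stage48",
      "src\\buffmini\\stage52", "src\\buffmini\\stage70", "src\\buffmini\\stage71"].any
        (fun pre => PySem.Str.startswith n pre)) = pvC2 n := by
  simp [pvC2, List.any_cons, List.any_nil]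

lemma pvC3_eq (n : String) :
    (["src\\buffmini\\ui", "src\\buffmini\\diagnostics", "scripts\\run_stage74"].any
        (fun pre => PySem.Str.startswith n pre)) = pvC3 n := by
  simp [pvC3, List.any_cons, List.any_nil]

lemma pvC4_eq (n : String) :
    (["tests\\"].any (fun pre => PySem.Str.startswith n pre))
      = PySem.Str.startswith n "tests\\" := by
  simp [List.any_cons, List.any_nil]

lemma pvC5_eq (n : String) :
    (["docs\\"].any (fun pre => PySem.Str.startswith n pre))
      = PySem.Str.startswith n "docs\\" := by
  simp [List.any_cons, List.any_nil]

lemma pvStepA_eq (g : PySem.Dict String (List String)) (p : String) :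
    pvStepA g p = g.modify (pvCls p) [] (· ++ [p]) := by
  simp only [pvStepA, pvCls, pvC1, pvC2, pvC3, Bool.or_assoc]
  split_ifs <;> rfl

lemma pvClassify_eq (p : String) : pvClassify p = pvCls p := by
  simp only [pvClassify, pvRules, pvCls]
  simp only [List.find?_cons, List.find?_nil, pvC1_eq, pvC2_eq, pvC3_eq, pvC4_eq, pvC5_eq]
  cases h1 : pvC1 (PySem.Str.replace p "/" "\\") <;>
  cases h2 : pvC2 (PySem.Str.replace p "/" "\\") <;>
  cases h3 : pvC3 (PySem.Str.replace p "/" "\\") <;>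
  cases h4 : PySem.Str.startswith (PySem.Str.replace p "/" "\\") "tests\\" <;>
  cases h5 : PySem.Str.startswith (PySem.Str.replace p "/" "\\") "docs\\" <;>
  simp only [h1, h2, h3, h4, h5] <;> rfl

lemma pvCls_mem (p : String) : pvCls p ∈ pvKeys0 := by
  simp only [pvCls, pvKeys0]
  split_ifs <;> simp

lemma pvGetD_fold (l : List String) (d : PySem.Dict String (List String)) (c : String) :
    (l.foldl (fun d p => d.modify (pvCls p) [] (· ++ [p])) d).getD c []
      = d.getD c [] ++ l.filter (fun p => pvCls p == c) := by
  induction l generalizing d with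
  | nil => simp
  | cons p l ih =>
    simp only [List.foldl_cons, ih, List.filter_cons, PySem.Dict.getD_modify]
    by_cases h : pvCls p = c
    · simp [h]
    · simp [h, Ne.symm h]

lemma pvKeys_fold_aux (l : List String) :
    ∀ d : PySem.Dict String (List String), d.keys = pvKeys0 →
      (l.foldl (fun d p => d.modify (pvCls p) [] (· ++ [p])) d).keys = pvKeys0 := by
  induction l with
  | nil => intro d h; simpa
  | cons p l ih =>
    intro d h
    simp only [List.foldl_cons]
    apply ih
    have hc : d.contains (pvCls p) = true := by
      rw [PySem.Dict.contains_eq_decide_mem_keys, h]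
      exact decide_eq_true (pvCls_mem p)
    simp [PySem.Dict.keys_modify, PySem.Dict.keys_insert_of_contains, hc, h]

lemma pvKeys_fold (l : List String) :
    (l.foldl (fun d p => d.modify (pvCls p) [] (· ++ [p])) pvInit).keys = pvKeys0 := by
  exact pvKeys_fold_aux l pvInit (by decide)

-- ===== VERDICT (by name: the statement is the Claim_ definition above) =====
theorem group_changed_files_py_spec : Claim_equal_group_changed_files_py := by
  intro paths _
  unfold Spec_group_changed_files_py
  show group_changed_files_py paths = _
  have hf : List.foldl pvStepA pvInit paths
      = List.foldl (fun d p => d.modify (pvCls p) [] (· ++ [p])) pvInit paths := by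
    apply List.foldl_ext
    intro a b _
    exact pvStepA_eq a b
  have hA : group_changed_files_py paths =
      ((paths.foldl (fun d p => d.modify (pvCls p) [] (· ++ [p])) pvInit).items).filter
        (fun kv => !kv.2.isEmpty) := by
    simp only [group_changed_files_py]
    simp only [pvInit] at hf
    rw [hf]
    rfl
  rw [hA]
  have hnd : (paths.foldl (fun d p => d.modify (pvCls p) [] (· ++ [p])) pvInit).keys.Nodup := by
    rw [pvKeys_fold]; decide
  rw [PySem.Dict.items_eq_map_keys _ hnd [], pvKeys_fold]
  have hinit : ∀ c ∈ pvKeys0, pvInit.getD c [] = ([] : List String) := by decide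
  simp only [pvKeys0, List.map_cons, List.map_nil, pvGetD_fold]
  rw [hinit _ (by decide), hinit _ (by decide), hinit _ (by decide),
      hinit _ (by decide), hinit _ (by decide), hinit _ (by decide)]
  simp only [List.nil_append]
  simp only [group_changed_files_py_alt, pvClassify_eq, pvRules, List.map_cons, List.map_nil,
    List.cons_append, List.nil_append, List.foldl_cons, List.foldl_nil]
  by_cases h1 : (paths.filter (fun p => pvCls p == "validation_and_decision_semantics")).isEmpty = true <;>
  by_cases h2 : (paths.filter (fun p => pvCls p == "backtest_and_data_validity")).isEmpty = true <;>
  by_cases h3 : (paths.filter (fun p => pvCls p == "reporting_and_ui")).isEmpty = true <;>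
  by_cases h4 : (paths.filter (fun p => pvCls p == "tests")).isEmpty = true <;>
  by_cases h5 : (paths.filter (fun p => pvCls p == "docs_and_artifacts")).isEmpty = true <;>
  by_cases h6 : (paths.filter (fun p => pvCls p == "workflow_and_misc")).isEmpty = true <;>
  simp [List.filter_nil, h1, h2, h3, h4, h5, h6]
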